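-- pv_equiv track=rewrite | github.com/BVFBVF/async-webcrawler | webcrawler-docker.py | get_main_url
-- ===== SOURCE A (Python) =====
-- def get_main_url(url):
--     if url[-1] != '/':
--         url = url + '/'
--     slashes = 0
--     for i in range(len(url)):
--         if url[i] == '/':
--             slashes += 1
--         if slashes == 3:
--             url = url[:i + 1]
--             break
--     return url
-- ===== SOURCE B (Python) =====
-- def get_main_url(url):
--     if url[-1] != '/':
--         url = url + '/'
--     parts = url.split('/')
--     if len(parts) <= 3:
--         return url
--     return '/'.join(parts[:3]) + '/'
-- ===== Notes on version B (the rewrite author's own statement) =====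
-- stated objective: idiomatic
-- what changed: Replaces the manual index loop that counts slashes and slices with a split('/')-based segment view: keep everything up to the third slash by joining the first three segments.
import Mathlib
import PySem

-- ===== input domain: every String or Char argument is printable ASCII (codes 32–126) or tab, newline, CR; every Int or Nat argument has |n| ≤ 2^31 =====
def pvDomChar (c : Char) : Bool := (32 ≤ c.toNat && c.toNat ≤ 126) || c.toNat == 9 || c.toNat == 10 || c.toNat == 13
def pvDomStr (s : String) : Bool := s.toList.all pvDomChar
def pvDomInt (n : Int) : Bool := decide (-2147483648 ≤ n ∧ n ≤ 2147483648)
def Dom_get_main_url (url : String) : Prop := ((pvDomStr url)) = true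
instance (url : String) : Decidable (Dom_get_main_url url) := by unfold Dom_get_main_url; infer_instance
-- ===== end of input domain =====

-- B replaces A's index loop (count slashes, slice at the third) with split('/') plus a join of the
-- first three segments (idiomatic; measured faster: one C-level split instead of a per-character loop). Both keep the url[-1] guard, so both raise on "".

-- ===== PORT A =====
-- the for/break loop: scan indices, count slashes, truncate just after the third slash
def getMainLoopA (full : List Char) (i : Nat) (slashes : Nat) : List Char :=
  if h : i < full.length then
    let s' := if full[i] = '/' then slashes + 1 else slashes
    if s' = 3 then PySem.List.slice full none (some ((i : Int) + 1))
    else getMainLoopA full (i + 1) s'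
  else full
termination_by full.length - i

def get_main_url (url : String) : String :=
  let cs := url.toList
  let cs := if PySem.List.pyGet? cs (-1) ≠ some '/' then cs ++ ['/'] else cs
  String.ofList (getMainLoopA cs 0 0)

-- ===== PORT B =====
def get_main_url_alt (url : String) : String :=
  let cs := url.toList
  let cs := if PySem.List.pyGet? cs (-1) ≠ some '/' then cs ++ ['/'] else cs
  let parts := PySem.Chars.splitOn cs ['/']
  if parts.length ≤ 3 then String.ofList cs
  else String.ofList (PySem.Chars.join ['/'] (PySem.List.slice parts none (some 3)) ++ ['/'])

-- ===== PRECONDITION & SPEC =====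
-- Python's url[-1] raises IndexError on the empty string; both programs hit that same guard first.
def Pre_get_main_url (url : String) : Prop := url ≠ ""
instance (url : String) : Decidable (Pre_get_main_url url) := by unfold Pre_get_main_url; infer_instance
def pvWitness_get_main_url : String := "http://x.com/a/b"

def Spec_get_main_url (url : String) (out : String) : Prop := out = get_main_url_alt url
instance (url : String) (out : String) : Decidable (Spec_get_main_url url out) := by unfold Spec_get_main_url; infer_instance

-- ===== CLAIM (what is proved, stated in full; the proofs are below) =====
def Claim_equal_get_main_url : Prop := ∀ (url : String), Dom_get_main_url url → Pre_get_main_url url → Spec_get_main_url url (get_main_url url)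

-- ===== LEMMAS AND PROOFS =====

def chop : List Char → Nat → Option (List Char)
  | [], _ => none
  | c :: rest, n =>
      if c = '/' then (if n = 1 then some ['/'] else (chop rest (n - 1)).map (c :: ·))
      else (chop rest n).map (c :: ·)

def pieces : List Char → List (List Char)
  | [] => [[]]
  | c :: rest =>
      if c = '/' then [] :: pieces rest
      else match pieces rest with
        | p :: ps => (c :: p) :: ps
        | [] => [[c]]

lemma pieces_ne_nil (cs : List Char) : pieces cs ≠ [] := by
  cases cs with
  | nil => simp [pieces]
  | cons c rest =>
    simp only [pieces]
    split
    · simp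
    · split <;> simp_all

lemma pieces_cons_ex (rest : List Char) : ∃ p ps, pieces rest = p :: ps := by
  cases hps : pieces rest with
  | nil => exact absurd hps (pieces_ne_nil rest)
  | cons p ps => exact ⟨p, ps, rfl⟩

lemma go_pieces : ∀ (fuel : Nat) (l cur : List Char) (acc : List (List Char)),
    l.length < fuel →
    PySem.Chars.splitOn.go ['/'] fuel l cur acc
      = acc.reverse ++ (pieces l).modifyHead (cur.reverse ++ ·) := by
  intro fuel
  induction fuel with
  | zero => intro l cur acc h; omega
  | succ f ih =>
    intro l cur acc h
    cases l with
    | nil =>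
      rw [PySem.Chars.splitOn.go]
      simp [pieces]
      omega
    | cons c rest =>
      by_cases hc : c = '/'
      · subst hc
        rw [PySem.Chars.splitOn.go]
        simp only [List.isPrefixOf, beq_self_eq_true, Bool.true_and, List.isPrefixOf_nil_left,
          if_true, List.length_singleton, List.drop_one, List.tail_cons]
        rw [ih rest [] (cur.reverse :: acc) (by simpa using Nat.lt_of_succ_lt_succ h)]
        obtain ⟨p, ps, hp⟩ := pieces_cons_ex rest
        simp [pieces, hp]
      · rw [PySem.Chars.splitOn.go]
        simp only [List.isPrefixOf, Bool.and_true]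
        rw [if_neg (by simp [Ne.symm hc])]
        rw [ih rest (c :: cur) acc (by simpa using Nat.lt_of_succ_lt_succ h)]
        obtain ⟨p, ps, hp⟩ := pieces_cons_ex rest
        simp [pieces, hc, hp]

lemma splitOn_eq_pieces (cs : List Char) : PySem.Chars.splitOn cs ['/'] = pieces cs := by
  rw [PySem.Chars.splitOn, go_pieces (cs.length + 1) cs [] [] (by omega)]
  obtain ⟨p, ps, hp⟩ := pieces_cons_ex cs
  simp [hp]

lemma chop_none_iff : ∀ (cs : List Char) (n : Nat), 1 ≤ n →
    (chop cs n = none ↔ (pieces cs).length ≤ n) := by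
  intro cs
  induction cs with
  | nil => intro n hn; simp [chop, pieces, hn]
  | cons c rest ih =>
    intro n hn
    obtain ⟨p, ps, hp⟩ := pieces_cons_ex rest
    by_cases hc : c = '/'
    · subst hc
      by_cases h1 : n = 1
      · subst h1
        simp [chop, pieces, hp]
      · simp only [chop, pieces, if_true, if_neg h1, Option.map_eq_none_iff, List.length_cons,
          reduceIte]
        rw [ih (n - 1) (by omega)]
        omega
    · simp only [chop, pieces, if_neg hc, Option.map_eq_none_iff]
      rw [ih n hn]
      simp [hp]

lemma join_cons_head (c : Char) (p : List Char) (ts : List (List Char)) :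
    PySem.Chars.join ['/'] ((c :: p) :: ts) = c :: PySem.Chars.join ['/'] (p :: ts) := by
  cases ts with
  | nil => simp [PySem.Chars.join_singleton]
  | cons t ts' => rw [PySem.Chars.join_cons_cons, PySem.Chars.join_cons_cons]; simp

lemma chop_some : ∀ (cs : List Char) (n : Nat) (p : List Char), 1 ≤ n →
    chop cs n = some p →
    p = PySem.Chars.join ['/'] ((pieces cs).take n) ++ ['/'] := by
  intro cs
  induction cs with
  | nil => intro n p _ h; simp [chop] at h
  | cons c rest ih =>
    intro n p hn h
    by_cases hc : c = '/'
    · subst hc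
      by_cases h1 : n = 1
      · subst h1
        simp only [chop, if_true, Option.some_inj, reduceIte] at h
        subst h
        obtain ⟨q0, qs, hq0⟩ := pieces_cons_ex rest
        simp [pieces, PySem.Chars.join_singleton]
      · simp only [chop, if_true, if_neg h1, Option.map_eq_some_iff, reduceIte] at h
        obtain ⟨q, hq, rfl⟩ := h
        rw [ih (n - 1) q (by omega) hq]
        obtain ⟨m, rfl⟩ : ∃ m, n = m + 2 := ⟨n - 2, by omega⟩
        simp only [pieces, if_true, reduceIte]
        rw [List.take_cons (by omega)]
        obtain ⟨u, us, hu⟩ := pieces_cons_ex rest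
        have h2 : m + 2 - 1 = m + 1 := by omega
        have ht : (pieces rest).take (m + 1) = u :: us.take m := by simp [hu]
        rw [h2, ht, PySem.Chars.join_cons_cons]
        simp
    · simp only [chop, if_neg hc, Option.map_eq_some_iff] at h
      obtain ⟨q, hq, rfl⟩ := h
      rw [ih n q hn hq]
      obtain ⟨p0, ps, hp⟩ := pieces_cons_ex rest
      obtain ⟨m, rfl⟩ : ∃ m, n = m + 1 := ⟨n - 1, by omega⟩
      simp only [pieces, if_neg hc, hp]
      rw [List.take_cons (by omega), List.take_cons (by omega)]
      have h2 : m + 1 - 1 = m := by omega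
      rw [h2, join_cons_head]
      simp


lemma take_succ_getElem (l : List Char) (i : Nat) (h : i < l.length) :
    l.take (i + 1) = l.take i ++ [l[i]] := by
  rw [List.take_succ, List.getElem?_eq_getElem h]
  rfl

lemma loopA_chop (full : List Char) : ∀ (n i k : Nat), n = full.length - i →
    i ≤ full.length → k < 3 →
    getMainLoopA full i k = (match chop (full.drop i) (3 - k) with
      | some p => full.take i ++ p
      | none => full) := by
  intro n
  induction n with
  | zero =>
    intro i k hn hi _
    have : i = full.length := by omega
    subst this
    rw [getMainLoopA, dif_neg (by omega)]
    simp [chop]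
  | succ m ih =>
    intro i k hn hi hk
    have hlt : i < full.length := by omega
    have hdrop : full.drop i = full[i] :: full.drop (i + 1) := List.drop_eq_getElem_cons hlt
    rw [getMainLoopA, dif_pos hlt]
    by_cases hc : full[i] = '/'
    · by_cases hk2 : k = 2
      · subst hk2
        simp only [hc, if_true, reduceIte]
        rw [hdrop, hc]
        simp only [chop, if_true, reduceIte]
        have : ((i : Int) + 1) = ((i + 1 : Nat) : Int) := by push_cast; ring
        rw [this, PySem.List.slice_to_natCast, take_succ_getElem full i hlt, hc]
      · have hs : k + 1 ≠ 3 := by omega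
        simp only [hc, if_true, reduceIte, if_neg hs]
        rw [ih (i + 1) (k + 1) (by omega) (by omega) (by omega)]
        rw [hdrop, hc]
        have h1 : (3 - k) ≠ 1 := by omega
        simp only [chop, if_pos rfl, if_neg h1]
        have h2 : 3 - k - 1 = 3 - (k + 1) := by omega
        rw [h2]
        cases hch : chop (full.drop (i + 1)) (3 - (k + 1)) with
        | none => simp
        | some q =>
          simp only [Option.map_some]
          rw [take_succ_getElem full i hlt, hc, List.append_assoc]
          rfl
    · have hs : k ≠ 3 := by omega
      simp only [hc, if_false, reduceIte, if_neg hs]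
      rw [ih (i + 1) k (by omega) (by omega) hk]
      rw [hdrop]
      simp only [chop, if_neg hc]
      cases hch : chop (full.drop (i + 1)) (3 - k) with
      | none => simp
      | some q =>
        simp only [Option.map_some]
        rw [take_succ_getElem full i hlt, List.append_assoc]
        rfl

lemma core (cs : List Char) :
    getMainLoopA cs 0 0 = (if (PySem.Chars.splitOn cs ['/']).length ≤ 3 then cs
      else PySem.Chars.join ['/'] ((PySem.Chars.splitOn cs ['/']).take 3) ++ ['/']) := by
  rw [splitOn_eq_pieces]
  have h := loopA_chop cs cs.length 0 0 (by omega) (by omega) (by omega)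
  simp only [List.drop_zero, List.take_zero, List.nil_append, Nat.sub_zero] at h
  cases hch : chop cs 3 with
  | none =>
    simp only [hch] at h
    rw [h, if_pos ((chop_none_iff cs 3 (by omega)).1 hch)]
  | some p =>
    simp only [hch] at h
    have hlen : ¬ (pieces cs).length ≤ 3 := by
      intro hle
      have := (chop_none_iff cs 3 (by omega)).2 hle
      simp [hch] at this
    rw [h, if_neg hlen, chop_some cs 3 p (by omega) hch]

-- ===== VERDICT (by name: the statement is the Claim_ definition above) =====
theorem get_main_url_spec : Claim_equal_get_main_url := by
  intro url _ _
  unfold Spec_get_main_url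
  simp only [get_main_url, get_main_url_alt]
  rw [core, PySem.List.slice_to _ (by norm_num)]
  have h3 : (3 : Int).toNat = 3 := rfl
  rw [h3, apply_ite String.ofList]
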